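-- pv_equiv track=rewrite | github.com/GuyHorn5/LaTeQ-Public | Subscript.py | subscript_sym
-- ===== SOURCE A (Python) =====
-- def subscript_sym(string):
--     i = 0
--     temp_str = ''
--     while i<len(string):
--         if string[i] == '{' and string[i-1] == '_':
--             left = string[:i]
--             i += 1
--             while(string[i] != '}'):
--                 temp_str += string[i]
--                 i += 1
--             count = temp_str.count(' ')
--             temp_str = temp_str.replace(' ', '_{')
--             temp_str = temp_str + count*'}'
--             right = string[i+1:]
--             string = left + '{' + temp_str + '}' + right
--             temp_str = ''
--         i += 1
--     return string
-- ===== SOURCE B (Python) =====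
-- def subscript_sym(string):
--     out = []
--     i = 0
--     n = len(string)
--     while i < n:
--         ch = string[i]
--         if ch == '{' and i > 0 and string[i - 1] == '_':
--             j = string.find('}', i + 1)
--             if j != -1:
--                 depth = 0
--                 buf = []
--                 for c in string[i + 1:j]:
--                     if c == ' ':
--                         buf.append('_{')
--                         depth += 1
--                     else:
--                         buf.append(c)
--                 out.append('{' + ''.join(buf) + depth * '}' + '}')
--                 i = j + 1
--                 continue
--         out.append(ch)
--         i += 1
--     return ''.join(out)
-- ===== Notes on version B (the rewrite author's own statement) =====
-- stated objective: alternative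
-- what changed: A repeatedly rebuilds the whole string (left + expanded block + right) and restarts scanning inside the rebuilt text; B makes a single left-to-right pass over the unchanged input with an output buffer, expanding each '_{...}' block exactly once via find('}')
-- intended difference: On strings that start with '{' and end with '_' whose first brace group contains a space before any '_{', A's negative-index wraparound string[i-1] at i=0 treats the leading brace as a subscript group and expands it (A('{a b}_') = '{a_{b}}_'); B leaves it unchanged ('{a b}_'), the intended behaviour since a leading '{' is preceded by nothing. — e.g. on subscript_sym("{a b}_"): A returns "{a_{b}}_", B returns "{a b}_"
import Mathlib
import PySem

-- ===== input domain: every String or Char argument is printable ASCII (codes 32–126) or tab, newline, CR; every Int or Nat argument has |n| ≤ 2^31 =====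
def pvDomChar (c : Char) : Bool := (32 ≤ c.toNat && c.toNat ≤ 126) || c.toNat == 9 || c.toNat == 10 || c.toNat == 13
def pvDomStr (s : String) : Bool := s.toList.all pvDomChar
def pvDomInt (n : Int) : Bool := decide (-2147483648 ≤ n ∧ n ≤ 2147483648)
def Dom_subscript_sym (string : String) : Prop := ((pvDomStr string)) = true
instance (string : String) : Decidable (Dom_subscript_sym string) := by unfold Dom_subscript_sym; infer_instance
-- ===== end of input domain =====

-- B is a single left-to-right pass over the unchanged input with an output buffer, instead
-- of A's rebuild of the whole string (left + expanded block + right) and rescan at every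
-- `_{…}` block; on strings that start with '{' and end with '_', A's negative-index
-- wraparound `string[i-1]` at i = 0 treats the leading brace as a subscript group — B
-- intentionally does not (see D_ below).

-- ===== PORT A =====
-- inner `while string[i] != '}'` loop of A: collects temp_str; none = IndexError
def pvInnerA (fuel : Nat) (l : List Char) (i : Nat) (temp : List Char) : Option (Nat × List Char) :=
  match fuel with
  | 0 => none
  | f + 1 =>
    match PySem.List.pyGet? l (i : Int) with
    | none => none
    | some c => if c = '}' then some (i, temp) else pvInnerA f l (i + 1) (temp ++ [c])

-- outer `while i < len(string)` loop of A; the string is rebuilt at each `_{` block.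
-- none = IndexError (propagated from the inner loop; fuel never runs out on Pre_ inputs).
def pvLoopA (fuel : Nat) (l : List Char) (i : Nat) : Option (List Char) :=
  match fuel with
  | 0 => none
  | f + 1 =>
    if i < l.length then
      if PySem.List.pyGet? l (i : Int) = some '{' ∧ PySem.List.pyGet? l ((i : Int) - 1) = some '_' then
        match pvInnerA l.length l (i + 1) [] with
        | none => none
        | some (j, temp) =>
          let cnt := PySem.Chars.count temp [' ']
          let temp2 := PySem.Chars.replace temp [' '] ['_', '{'] ++ List.replicate cnt '}'
          pvLoopA f (PySem.List.slice l none (some (i : Int)) ++ '{' :: (temp2 ++ '}' :: PySem.List.slice l (some ((j : Int) + 1)) none)) (j + 1)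
      else pvLoopA f l (i + 1)
    else some l

def subscript_sym (string : String) : String :=
  String.ofList ((pvLoopA (string.toList.length + 2 * string.toList.count ' ' + 1) string.toList 0).getD string.toList)

-- ===== PORT B =====
-- Source B's single pass: index loop over the fixed input, an output buffer `out`;
-- each `_{…}` block is expanded once by a fold over its content (buf, depth).
def pvLoopB (l : List Char) (fuel : Nat) (i : Nat) (out : List Char) : List Char :=
  match fuel with
  | 0 => out
  | f + 1 =>
    if i < l.length then
      let ch := PySem.List.pyGetD l (i : Int) ' '
      if ch = '{' ∧ 0 < i ∧ PySem.List.pyGetD l ((i : Int) - 1) ' ' = '_' then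
        let j := PySem.Chars.findFrom l ['}'] ((i : Int) + 1) none
        if j ≠ -1 then
          let p := (PySem.List.slice l (some ((i : Int) + 1)) (some j)).foldl
            (fun (acc : List Char × Nat) c =>
              if c = ' ' then (acc.1 ++ ['_', '{'], acc.2 + 1) else (acc.1 ++ [c], acc.2)) ([], 0)
          pvLoopB l f (j.toNat + 1) (out ++ '{' :: (p.1 ++ List.replicate p.2 '}' ++ ['}']))
        else pvLoopB l f (i + 1) (out ++ [ch])
      else pvLoopB l f (i + 1) (out ++ [ch])
    else out

def subscript_sym_alt (string : String) : String :=
  String.ofList (pvLoopB string.toList (string.toList.length + 1) 0 [])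

-- ===== PRECONDITION & SPEC =====
-- every '{' whose predecessor character (Python's string[i-1], so the LAST character when
-- the '{' is at position 0) is '_' must have a '}' somewhere after it
def pvGoodB : Char → List Char → Bool
  | _, [] => true
  | prev, c :: rest => ((!(c == '{' && prev == '_')) || rest.contains '}') && pvGoodB c rest

def pvPreB : List Char → Bool
  | [] => true
  | c :: rest => pvGoodB c rest && ((!(c == '{' && (c :: rest).getLast? == some '_')) || rest.contains '}')

-- Pre_ excludes exactly the inputs on which A raises IndexError: a '_{' (including the
-- wraparound one at position 0) with no '}' after it makes A's inner while run off the end.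
def Pre_subscript_sym (string : String) : Prop := pvPreB string.toList = true
instance (string : String) : Decidable (Pre_subscript_sym string) := by unfold Pre_subscript_sym; infer_instance

def pvWitness_subscript_sym : String := "x_{a b c}"

-- the prefix of t before the first occurrence of the pattern '_{' (the whole of t if absent)
def pvPatSplit : List Char → Option (List Char × List Char)
  | [] => none
  | '_' :: '{' :: rest => some ([], rest)
  | c :: rest => (pvPatSplit rest).map (fun p => (c :: p.1, p.2))

def pvBeforePat (t : List Char) : List Char := ((pvPatSplit t).map Prod.fst).getD t

-- On strings that start with '{' and end with '_' whose first brace group has a space before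
-- any '_{', A's negative-index wraparound expands that group as if it were a subscript
-- (e.g. "{a b}_" ↦ "{a_{b}}_"); B returns the input region unchanged ("{a b}_"), the
-- intended reading since a leading '{' is preceded by nothing.
def D_subscript_sym (string : String) : Prop :=
  string.toList.head? = some '{' ∧ string.toList.getLast? = some '_' ∧
    '}' ∈ string.toList.tail ∧ ' ' ∈ pvBeforePat (string.toList.tail.takeWhile (· ≠ '}'))
instance (string : String) : Decidable (D_subscript_sym string) := by unfold D_subscript_sym; infer_instance

def Spec_subscript_sym (string : String) (out : String) : Prop := ¬ D_subscript_sym string → out = subscript_sym_alt string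
instance (string : String) (out : String) : Decidable (Spec_subscript_sym string out) := by unfold Spec_subscript_sym; infer_instance

def pvDiffWitness_subscript_sym : String := "{a b}_"
def pvDiffWitnessOut_subscript_sym : String × String := ("{a_{b}}_", "{a b}_")

-- ===== CLAIM =====
def Claim_unchanged_subscript_sym : Prop := ∀ (string : String), Dom_subscript_sym string → Pre_subscript_sym string → Spec_subscript_sym string (subscript_sym string)
def Claim_changed_subscript_sym : Prop := Dom_subscript_sym (pvDiffWitness_subscript_sym) ∧ Pre_subscript_sym (pvDiffWitness_subscript_sym) ∧ D_subscript_sym (pvDiffWitness_subscript_sym) ∧ subscript_sym (pvDiffWitness_subscript_sym) = pvDiffWitnessOut_subscript_sym.1 ∧ subscript_sym_alt (pvDiffWitness_subscript_sym) = pvDiffWitnessOut_subscript_sym.2 ∧ pvDiffWitnessOut_subscript_sym.1 ≠ pvDiffWitnessOut_subscript_sym.2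
def Claim_exact_subscript_sym : Prop := ∀ (string : String), Dom_subscript_sym string → Pre_subscript_sym string → D_subscript_sym string → subscript_sym string ≠ subscript_sym_alt string

-- ===== LEMMAS AND PROOFS =====

-- the common one-pass specification both ports are reduced to:
-- pvScan prev s scans s left to right, prev being the character just before s
def pvExpand (t : List Char) : List Char := t.flatMap (fun c => if c = ' ' then ['_', '{'] else [c])

def pvScan (prev : Char) (s : List Char) : List Char :=
  match s with
  | [] => []
  | c :: rest =>
    if c = '{' ∧ prev = '_' ∧ '}' ∈ rest then
      '{' :: (pvExpand (rest.takeWhile (· ≠ '}')) ++ List.replicate ((rest.takeWhile (· ≠ '}')).count ' ') '}'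
        ++ '}' :: pvScan '}' ((rest.dropWhile (· ≠ '}')).tail))
    else c :: pvScan c rest
termination_by s.length
decreasing_by
  · have h1 : (rest.dropWhile (· ≠ '}')).length ≤ rest.length := List.length_dropWhile_le _ _
    have h2 : ((rest.dropWhile (· ≠ '}')).tail).length ≤ (rest.dropWhile (· ≠ '}')).length := by
      cases rest.dropWhile (· ≠ '}') <;> simp
    simp only [List.length_cons]; omega
  · simp

-- decompose rest at its first '}'
lemma pvSplitBrace {rest : List Char} (h : '}' ∈ rest) :
    rest = rest.takeWhile (· ≠ '}') ++ '}' :: (rest.dropWhile (· ≠ '}')).tail := by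
  conv_lhs => rw [← List.takeWhile_append_dropWhile (p := (· ≠ '}')) (l := rest)]
  congr 1
  have hne : rest.dropWhile (· ≠ '}') ≠ [] := by
    intro hnil
    have := List.dropWhile_eq_nil_iff.mp hnil
    simp at this
    exact absurd rfl (this _ h)
  have hh := List.head_dropWhile_not (· ≠ '}') hne
  conv_lhs => rw [← List.cons_head_tail hne]
  congr 1
  simpa using hh

lemma pvTakeWhile_no_brace (rest : List Char) : '}' ∉ rest.takeWhile (· ≠ '}') := by
  intro h
  have := List.mem_takeWhile_imp h
  simp at this

-- expansion facts
lemma pvExpand_append (a b : List Char) : pvExpand (a ++ b) = pvExpand a ++ pvExpand b := by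
  simp [pvExpand]
lemma pvExpand_no_space {t : List Char} (h : ' ' ∉ t) : pvExpand t = t := by
  induction t with
  | nil => rfl
  | cons c t ih =>
    simp only [List.mem_cons, not_or] at h
    simp [pvExpand, List.flatMap_cons] at ih ⊢
    rw [if_neg (by simpa using Ne.symm h.1), ih h.2]
    simp
lemma pvExpand_space_not_mem (t : List Char) : ' ' ∉ pvExpand t := by
  intro h
  simp only [pvExpand, List.mem_flatMap] at h
  obtain ⟨c, _, hc⟩ := h
  by_cases hcs : c = ' '
  · simp [hcs] at hc
  · simp [hcs] at hc; exact hcs hc.symm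
lemma pvExpand_length (t : List Char) : (pvExpand t).length = t.length + t.count ' ' := by
  induction t with
  | nil => simp [pvExpand]
  | cons c t ih =>
    by_cases hc : c = ' ' <;>
      simp [pvExpand, List.flatMap_cons, hc] at ih ⊢ <;> omega

-- bridges: A's str.replace / str.count on a one-character pattern
lemma pvReplace_go (fuel : Nat) : ∀ (t acc : List Char), t.length ≤ fuel →
    PySem.Chars.replace.go [' '] ['_', '{'] fuel t acc = acc.reverse ++ pvExpand t := by
  induction fuel with
  | zero => intro t acc h; rw [PySem.Chars.replace.go.eq_def]; simp at h; simp [h, pvExpand]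
  | succ f ih =>
    intro t acc h
    rw [PySem.Chars.replace.go.eq_def]
    match t with
    | [] => simp [pvExpand]
    | c :: t =>
      simp only []
      by_cases hc : c = ' '
      · rw [if_pos (by simp [hc, List.isPrefixOf])]
        subst hc
        simp only [List.length_cons, List.length_nil, List.drop_succ_cons, List.drop_zero]
        rw [ih t _ (by simpa using h)]
        simp [pvExpand, List.flatMap_cons]
      · rw [if_neg (by simp [List.isPrefixOf]; exact fun hh => hc hh.symm)]
        rw [ih t _ (by simpa using h)]
        simp [pvExpand, List.flatMap_cons, hc]

lemma pvReplace_single (t : List Char) :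
    PySem.Chars.replace t [' '] ['_', '{'] = pvExpand t := by
  rw [PySem.Chars.replace]
  simp only [List.isEmpty_cons, Bool.false_eq_true, if_false]
  exact pvReplace_go t.length t [] le_rfl
lemma pvCount_go (fuel : Nat) : ∀ (t : List Char) (acc : Nat), t.length ≤ fuel →
    PySem.Chars.count.go [' '] fuel t acc = acc + t.count ' ' := by
  induction fuel with
  | zero => intro t acc h; rw [PySem.Chars.count.go.eq_def]; simp at h; simp [h]
  | succ f ih =>
    intro t acc h
    rw [PySem.Chars.count.go.eq_def]
    match t with
    | [] => simp
    | c :: t =>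
      simp only []
      by_cases hc : c = ' '
      · rw [if_pos (by simp [hc, List.isPrefixOf])]
        subst hc
        simp only [List.length_cons, List.length_nil, List.drop_succ_cons, List.drop_zero]
        rw [ih t _ (by simpa using h)]
        simp
        omega
      · rw [if_neg (by simp [List.isPrefixOf]; exact fun hh => hc hh.symm)]
        rw [ih t _ (by simpa using h)]
        simp [hc]

lemma pvCount_single (t : List Char) : PySem.Chars.count t [' '] = t.count ' ' := by
  rw [PySem.Chars.count]
  simp only [List.isEmpty_cons, Bool.false_eq_true, if_false]
  simpa using pvCount_go t.length t 0 le_rfl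

-- A's inner while loop collects exactly the text up to the first '}'
lemma pvInnerA_spec (t : List Char) : ∀ (fuel i : Nat) (acc : List Char) (l r : List Char),
    l.drop i = t ++ '}' :: r → '}' ∉ t → t.length + 1 ≤ fuel →
    pvInnerA fuel l i acc = some (i + t.length, acc ++ t) := by
  induction t with
  | nil =>
    intro fuel i acc l r hd hnb hf
    match fuel, hf with
    | f + 1, _ =>
      rw [pvInnerA]
      have : PySem.List.pyGet? l (i : Int) = some '}' := by
        rw [PySem.List.pyGet?_natCast]
        rw [← List.head?_drop, hd]
        rfl
      rw [this]
      simp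
  | cons c t ih =>
    intro fuel i acc l r hd hnb hf
    match fuel, hf with
    | f + 1, hf =>
      rw [pvInnerA]
      have : PySem.List.pyGet? l (i : Int) = some c := by
        rw [PySem.List.pyGet?_natCast]
        rw [← List.head?_drop, hd]
        rfl
      rw [this]
      simp only [List.mem_cons, not_or] at hnb
      simp only []
      rw [if_neg (fun hh : c = '}' => hnb.1 hh.symm)]
      have hd' : l.drop (i + 1) = t ++ '}' :: r := by
        have h2 := congrArg List.tail hd
        rw [List.tail_drop] at h2
        simpa using h2
      rw [ih f (i+1) (acc ++ [c]) l r hd' hnb.2 (by simp at hf; omega)]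
      simp only [List.length_cons, List.append_assoc, List.cons_append, List.nil_append]
      congr 2
      omega

-- B's fold over a block's content
lemma pvFoldB (t : List Char) : ∀ (acc : List Char) (d : Nat),
    (t.foldl (fun (acc : List Char × Nat) c =>
      if c = ' ' then (acc.1 ++ ['_', '{'], acc.2 + 1) else (acc.1 ++ [c], acc.2)) (acc, d))
      = (acc ++ pvExpand t, d + t.count ' ') := by
  induction t with
  | nil => intro acc d; simp [pvExpand]
  | cons c t ih =>
    intro acc d
    by_cases hc : c = ' ' <;>
      simp only [List.foldl_cons, hc, if_pos, if_neg, reduceIte] <;>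
      rw [ih] <;> simp [pvExpand, List.flatMap_cons, hc, List.count_cons] <;> omega

-- pvGoodB facts
lemma pvGood_peel (t : List Char) : ∀ (prev : Char) (r : List Char),
    pvGoodB prev (t ++ '}' :: r) = true → pvGoodB '}' r = true := by
  induction t with
  | nil =>
    intro prev r h
    simp only [List.nil_append, pvGoodB, Bool.and_eq_true] at h
    exact h.2
  | cons c t ih =>
    intro prev r h
    simp only [List.cons_append, pvGoodB, Bool.and_eq_true] at h
    exact ih c r h.2
lemma pvGood_mid (mid : List Char) : ∀ (prev : Char) (r : List Char),
    pvGoodB '}' r = true → pvGoodB prev (mid ++ '}' :: r) = true := by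
  induction mid with
  | nil =>
    intro prev r h
    simp only [List.nil_append, pvGoodB, Bool.and_eq_true]
    exact ⟨by simp, h⟩
  | cons c mid ih =>
    intro prev r h
    simp only [List.cons_append, pvGoodB, Bool.and_eq_true]
    refine ⟨?_, ih c r h⟩
    rw [Bool.or_eq_true]
    right
    simp

-- takeWhile/dropWhile across an append whose first failure is y
lemma pvTWappend {p : Char → Bool} (u : List Char) : ∀ (y : Char) (z : List Char), (∀ x ∈ u, p x) → p y = false →
    (u ++ y :: z).takeWhile p = u ∧ (u ++ y :: z).dropWhile p = y :: z := by
  induction u with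
  | nil => intro y z _ hy; simp [List.dropWhile_cons, hy]
  | cons c u ih =>
    intro y z hu hy
    have hc : p c = true := hu c (by simp)
    have := ih y z (fun x hx => hu x (by simp [hx])) hy
    simp [hc, this.1, this.2]

-- scanning a space-free region that ends at a '}' changes nothing
lemma pvScan_inert (n : Nat) : ∀ (mid : List Char), mid.length ≤ n → ∀ (prev : Char) (r : List Char),
    ' ' ∉ mid → pvScan prev (mid ++ '}' :: r) = mid ++ '}' :: pvScan '}' r := by
  induction n with
  | zero =>
    intro mid h prev r _
    have hm : mid = [] := List.eq_nil_of_length_eq_zero (by omega)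
    subst hm
    rw [List.nil_append, pvScan]
    simp
  | succ n ih =>
    intro mid h prev r hs
    match mid with
    | [] =>
      rw [List.nil_append, pvScan]
      simp
    | c :: m =>
      simp only [List.mem_cons, not_or] at hs
      rw [List.cons_append, pvScan]
      by_cases htr : c = '{' ∧ prev = '_' ∧ '}' ∈ m ++ '}' :: r
      · rw [if_pos htr]
        by_cases hm : '}' ∈ m
        · have hsplit := pvSplitBrace hm
          have htw := pvTWappend (m.takeWhile (· ≠ '}')) '}' ((m.dropWhile (· ≠ '}')).tail ++ '}' :: r)
            (fun x hx => List.mem_takeWhile_imp hx) (by simp)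
          have hmem : ∀ x ∈ (m.dropWhile (· ≠ '}')).tail, x ∈ m := by
            intro x hx
            have hx2 : x ∈ m.takeWhile (· ≠ '}') ++ '}' :: (m.dropWhile (· ≠ '}')).tail :=
              List.mem_append_right _ (List.mem_cons_of_mem _ hx)
            rwa [← hsplit] at hx2
          have harr : m ++ '}' :: r = m.takeWhile (· ≠ '}') ++ '}' :: ((m.dropWhile (· ≠ '}')).tail ++ '}' :: r) := by
            conv_lhs => rw [hsplit]
            simp
          rw [harr, htw.1, htw.2]
          have hts : ' ' ∉ m.takeWhile (· ≠ '}') := fun hx => hs.2 ((List.takeWhile_prefix _).subset hx)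
          have hcnt : (m.takeWhile (· ≠ '}')).count ' ' = 0 := List.count_eq_zero.mpr hts
          rw [pvExpand_no_space hts, hcnt, List.tail_cons]
          have hlen : ((m.dropWhile (· ≠ '}')).tail).length ≤ n := by
            have h3 := congrArg List.length hsplit
            rw [List.length_append, List.length_cons] at h3
            simp only [List.length_cons] at h
            omega
          rw [ih _ hlen '}' r (fun hx => hs.2 (hmem _ hx))]
          rw [htr.1]
          conv_rhs => rw [hsplit]
          simp only [List.replicate_zero, List.append_nil, List.nil_append, List.cons_append,
            List.append_assoc, List.append_cancel_left_eq, List.cons.injEq, true_and]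
        · have htw := pvTWappend m '}' r (fun x hx => by
              have hxe : x ≠ '}' := fun hxe => hm (hxe ▸ hx)
              exact decide_eq_true hxe) (by decide)
          rw [htw.1, htw.2, List.tail_cons]
          have hcnt : m.count ' ' = 0 := List.count_eq_zero.mpr hs.2
          rw [pvExpand_no_space hs.2, hcnt, htr.1]
          simp only [List.replicate_zero, List.append_nil, List.cons_append]
      · rw [if_neg htr]
        rw [ih m (by simp only [List.length_cons] at h; omega) c r hs.2, List.cons_append]

-- pvPatSplit facts and walking lemmas for the wraparound block
lemma pvPatSplit_eq (t : List Char) : ∀ {u v : List Char}, pvPatSplit t = some (u, v) → t = u ++ '_' :: '{' :: v := by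
  induction t using pvPatSplit.induct with
  | case1 => intro u v h; simp [pvPatSplit] at h
  | case2 rest => intro u v h; simp [pvPatSplit] at h; simp [← h.1, ← h.2]
  | case3 c rest hne ih =>
    intro u v h
    rw [pvPatSplit.eq_def] at h
    split at h
    · simp at h
    · next rest2 heq =>
      obtain ⟨hc, hr⟩ := List.cons.inj heq
      exact (hne rest2 hc hr).elim
    · next c2 rest2 _ heq =>
      obtain ⟨hc, hr⟩ := List.cons.inj heq
      subst hc
      subst hr
      rw [Option.map_eq_some_iff] at h
      obtain ⟨p, hp, hpe⟩ := h
      obtain ⟨h1, h2⟩ := Prod.mk.inj hpe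
      rw [← h1, ← h2, ih hp]
      simp
lemma pvScan_pat (t : List Char) : ∀ {u v : List Char} (prev : Char) (r : List Char),
    pvPatSplit t = some (u, v) → '}' ∉ t → (prev = '_' → t.head? ≠ some '{') →
    pvScan prev (t ++ '}' :: r) =
      u ++ '_' :: '{' :: (pvExpand v ++ List.replicate (v.count ' ') '}' ++ '}' :: pvScan '}' r) := by
  induction t using pvPatSplit.induct with
  | case1 => intro u v prev r h _ _; simp [pvPatSplit] at h
  | case2 rest =>
    intro u v prev r h hb _
    simp [pvPatSplit] at h
    obtain ⟨rfl, rfl⟩ := h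
    simp only [List.mem_cons, not_or] at hb
    rw [List.cons_append, pvScan, if_neg (by simp)]
    rw [List.cons_append, pvScan]
    have htw := pvTWappend (p := (· ≠ '}')) rest '}' r
      (fun x hx => decide_eq_true (fun hxe : x = '}' => hb.2.2 (hxe ▸ hx))) (by decide)
    rw [if_pos ⟨rfl, rfl, by simp⟩, htw.1, htw.2, List.tail_cons]
    simp
  | case3 c rest hne ih =>
    intro u v prev r h hb hh
    rw [pvPatSplit.eq_def] at h
    split at h
    · simp at h
    · next rest2 heq =>
      obtain ⟨hc, hr⟩ := List.cons.inj heq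
      exact (hne rest2 hc hr).elim
    · next c2 rest2 _ heq =>
      obtain ⟨hc, hr⟩ := List.cons.inj heq
      subst hc
      subst hr
      rw [Option.map_eq_some_iff] at h
      obtain ⟨p, hp, hpe⟩ := h
      obtain ⟨h1, h2⟩ := Prod.mk.inj hpe
      simp only [List.mem_cons, not_or] at hb
      rw [List.cons_append, pvScan, if_neg ?hneg]
      case hneg =>
        rintro ⟨hc1, hc2, -⟩
        exact (hh hc2 (by simp [hc1])).elim
      rw [ih c r hp hb.2 ?hh2]
      case hh2 =>
        intro hcu hhd
        rcases rest with _ | ⟨d, rest'⟩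
        · simp at hhd
        · simp at hhd
          exact hne rest' hcu (by rw [hhd])
      rw [← h1, ← h2]
      simp
lemma pvScan_nopat (t : List Char) : ∀ (prev : Char) (r : List Char),
    pvPatSplit t = none → '}' ∉ t → (prev = '_' → t.head? ≠ some '{') →
    pvScan prev (t ++ '}' :: r) = t ++ '}' :: pvScan '}' r := by
  induction t using pvPatSplit.induct with
  | case1 =>
    intro prev r _ _ _
    rw [List.nil_append, pvScan]
    simp
  | case2 rest => intro prev r h _ _; simp [pvPatSplit] at h
  | case3 c rest hne ih =>
    intro prev r h hb hh
    rw [pvPatSplit.eq_def] at h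
    split at h
    · next heq => simp at heq
    · next rest2 heq =>
      obtain ⟨hc, hr⟩ := List.cons.inj heq
      exact (hne rest2 hc hr).elim
    · next c2 rest2 _ heq =>
      obtain ⟨hc, hr⟩ := List.cons.inj heq
      subst hc
      subst hr
      rw [Option.map_eq_none_iff] at h
      simp only [List.mem_cons, not_or] at hb
      rw [List.cons_append, pvScan, if_neg ?hneg]
      case hneg =>
        rintro ⟨hc1, hc2, -⟩
        exact (hh hc2 (by simp [hc1])).elim
      rw [ih c r h hb.2 ?hh2, List.cons_append]
      case hh2 =>
        intro hcu hhd
        rcases rest with _ | ⟨d, rest'⟩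
        · simp at hhd
        · simp at hhd
          exact hne rest' hcu (by rw [hhd])

-- find bridge for B
lemma pvPrefixSingleton (a : Char) (l : List Char) : [a] <+: l ↔ l.head? = some a := by
  constructor
  · rintro ⟨t, rfl⟩; simp
  · intro h
    rcases l with _ | ⟨c, t⟩
    · simp at h
    · simp at h
      exact ⟨t, by simp [h]⟩

lemma pvTWlen (rest : List Char) : ∀ (k : Nat), k < rest.length →
    rest[k]? = some '}' → (∀ i, i < k → rest[i]? ≠ some '}') →
    (rest.takeWhile (· ≠ '}')).length = k := by
  induction rest with
  | nil => intro k h _ _; simp at h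
  | cons c rest ih =>
    intro k hk hke hmin
    match k with
    | 0 =>
      simp at hke
      simp [List.takeWhile_cons, hke]
    | k + 1 =>
      have hc : c ≠ '}' := by
        intro hc
        exact hmin 0 (by omega) (by simp [hc])
      rw [List.takeWhile_cons, if_pos (decide_eq_true hc)]
      simp only [List.length_cons]
      rw [ih k (by simpa using hk) (by simpa using hke)
        (fun i hi => by simpa using hmin (i+1) (by omega))]

lemma pvFind_mem {rest : List Char} (h : '}' ∈ rest) :
    PySem.Chars.find rest ['}'] = ((rest.takeWhile (· ≠ '}')).length : Int) := by
  have hin : ['}'] <:+: rest := (List.singleton_infix_iff _ _).mpr h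
  have h0 : 0 ≤ PySem.Chars.find rest ['}'] := (PySem.Chars.find_nonneg_iff _ _).mpr hin
  obtain ⟨hpre, hmin⟩ := PySem.Chars.find_spec h0
  set k := (PySem.Chars.find rest ['}']).toNat with hkdef
  rw [pvPrefixSingleton, List.head?_drop] at hpre
  have hklen : k < rest.length := by
    by_contra hge
    rw [List.getElem?_eq_none (by omega)] at hpre
    simp at hpre
  rw [pvTWlen rest k hklen hpre (fun i hi hie => by
    have := hmin i hi
    rw [pvPrefixSingleton, List.head?_drop, hie] at this
    exact this rfl)]
  omega

lemma pvFind_not_mem {rest : List Char} (h : '}' ∉ rest) :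
    PySem.Chars.find rest ['}'] = -1 := by
  rw [PySem.Chars.find_eq_neg_one_iff, List.singleton_infix_iff]
  exact h

-- take/drop across an append at an offset past the first part
lemma pvTakeApp (a z : List Char) (k : Nat) : (a ++ z).take (a.length + k) = a ++ z.take k := by
  rw [List.take_append, List.take_of_length_le (by omega)]
  congr 2
  omega
lemma pvDropApp (a z : List Char) (k : Nat) : (a ++ z).drop (a.length + k) = z.drop k := by
  rw [List.drop_append, List.drop_eq_nil_of_le (by omega), List.nil_append]
  congr 1
  omega

-- MAIN A: the rebuild-and-rescan loop equals the one-pass scan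
theorem pvLoopA_spec (fuel : Nat) : ∀ (l : List Char) (i : Nat) (prev : Char),
    1 ≤ i → l[i-1]? = some prev → pvGoodB prev (l.drop i) = true →
    (l.length - i) + 2 * (l.drop i).count ' ' + 1 ≤ fuel →
    pvLoopA fuel l i = some (l.take i ++ pvScan prev (l.drop i)) := by
  induction fuel with
  | zero => intro l i prev _ _ _ hf; omega
  | succ f ih =>
    intro l i prev hip hprev hgood hf
    rw [pvLoopA]
    by_cases hi : i < l.length
    · rw [if_pos hi]
      have hdrop : l.drop i = l[i] :: l.drop (i + 1) := List.drop_eq_getElem_cons hi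
      have hgeti : PySem.List.pyGet? l (i : Int) = some l[i] := by
        rw [PySem.List.pyGet?_natCast]
        exact List.getElem?_eq_getElem hi
      have hgetp : PySem.List.pyGet? l ((i : Int) - 1) = some prev := by
        rw [show ((i : Int) - 1) = ((i - 1 : Nat) : Int) by omega, PySem.List.pyGet?_natCast]
        exact hprev
      have hcountstep : (l.drop i).count ' ' = (if l[i] = ' ' then 1 else 0) + (l.drop (i + 1)).count ' ' := by
        rw [hdrop, List.count_cons]
        simp only [beq_iff_eq]
        exact Nat.add_comm _ _
      by_cases htr : l[i] = '{' ∧ prev = '_'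
      · rw [if_pos ⟨by rw [hgeti, htr.1], by rw [hgetp, htr.2]⟩]
        have hgood' : pvGoodB prev (l[i] :: l.drop (i + 1)) = true := by rw [← hdrop]; exact hgood
        simp only [pvGoodB, Bool.and_eq_true] at hgood'
        obtain ⟨hclause, hgtail⟩ := hgood'
        have hm : '}' ∈ l.drop (i + 1) := by
          rw [htr.1, htr.2] at hclause
          simpa using hclause
        have hsplit := pvSplitBrace hm
        have hlen1 : (l.drop (i + 1)).length = l.length - (i + 1) := List.length_drop
        have hlen2 := congrArg List.length hsplit
        rw [List.length_append, List.length_cons] at hlen2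
        have hinner : pvInnerA l.length l (i + 1) [] =
            some ((i + 1) + ((l.drop (i + 1)).takeWhile (· ≠ '}')).length, [] ++ (l.drop (i + 1)).takeWhile (· ≠ '}')) := by
          exact pvInnerA_spec _ l.length (i + 1) [] l _ hsplit (pvTakeWhile_no_brace _) (by omega)
        rw [hinner]
        simp only [List.nil_append]
        set rest := l.drop (i + 1) with hrest
        set t := rest.takeWhile (· ≠ '}') with htdef
        set m := (rest.dropWhile (· ≠ '}')).tail with hmdef
        rw [pvCount_single, pvReplace_single]
        have hsl1 : PySem.List.slice l none (some (i : Int)) = l.take i := PySem.List.slice_to_natCast l i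
        have hsl2 : PySem.List.slice l (some ((((i + 1) + t.length : Nat) : Int) + 1)) none = l.drop (i + t.length + 2) := by
          rw [show ((((i + 1) + t.length : Nat) : Int) + 1) = ((i + t.length + 2 : Nat) : Int) by omega]
          exact PySem.List.slice_from_natCast l _
        have hdropj : l.drop (i + t.length + 2) = m := by
          rw [show i + t.length + 2 = (i + 1) + (t.length + 1) by omega, ← List.drop_drop, ← hrest]
          conv_lhs => rw [hsplit]
          simp
        rw [hsl1, hsl2, hdropj]
        have hgm : pvGoodB '}' m = true := by
          rw [hsplit] at hgtail
          exact pvGood_peel t l[i] m hgtail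
        have hcount2 : rest.count ' ' = t.count ' ' + m.count ' ' := by
          conv_lhs => rw [hsplit]
          simp [List.count_append]
        have hbrace2 : l[i + t.length + 1]? = some '}' := by
          have hx : rest[t.length]? = some '}' := by
            conv_lhs => rw [hsplit]
            rw [List.getElem?_append_right le_rfl]
            simp
          rw [hrest, List.getElem?_drop] at hx
          rw [show i + t.length + 1 = i + 1 + t.length by omega]
          exact hx
        have hspn : l.take i ++ pvScan prev (l.drop i) =
            l.take i ++ '{' :: (pvExpand t ++ List.replicate (t.count ' ') '}' ++ '}' :: pvScan '}' m) := by
          rw [hdrop, pvScan, if_pos ⟨htr.1, htr.2, hm⟩, ← htdef, ← hmdef]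
        by_cases hcnt : t.count ' ' = 0
        · have hXt : pvExpand t ++ List.replicate (t.count ' ') '}' = t := by
            rw [hcnt, pvExpand_no_space (List.count_eq_zero.mp hcnt)]
            simp
          have hleq : l = l.take i ++ '{' :: (t ++ '}' :: m) := by
            conv_lhs => rw [← List.take_append_drop i l, hdrop, htr.1]
            rw [hsplit]
          rw [hXt, ← hleq]
          rw [ih l ((i + 1) + t.length + 1) '}' (by omega)
            (by rw [show (i + 1) + t.length + 1 - 1 = i + t.length + 1 by omega]; exact hbrace2)
            (by rw [show (i + 1) + t.length + 1 = i + t.length + 2 by omega, hdropj]; exact hgm)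
            (by
              rw [show (i + 1) + t.length + 1 = i + t.length + 2 by omega, hdropj]
              rw [hcountstep, htr.1] at hf
              rw [hcount2, hcnt] at hf
              simp at hf
              omega)]
          rw [show (i + 1) + t.length + 1 = i + t.length + 2 by omega, hdropj, hspn]
          have htki : (l.take i).length = i := by simp [List.length_take]; omega
          have htk : l.take (i + t.length + 2) = l.take i ++ '{' :: (t ++ ['}']) := by
            conv_lhs => rw [hleq]
            rw [show i + t.length + 2 = (l.take i).length + (t.length + 2) by omega, pvTakeApp,
              List.take_succ_cons, show t.length + 1 = t.length + 1 by rfl,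
              show (t ++ '}' :: m).take (t.length + 1) = t ++ ['}'] from by
                rw [show t.length + 1 = t.length + 1 by rfl, pvTakeApp t ('}' :: m) 1]
                rfl]
          rw [htk, hXt]
          simp
        · set X := pvExpand t ++ List.replicate (t.count ' ') '}' with hXdef
          have hXlen : X.length = t.length + 2 * t.count ' ' := by
            simp [hXdef, pvExpand_length t]
            omega
          have hXnospace : ' ' ∉ X := by
            rw [hXdef]
            intro hsp
            rcases List.mem_append.mp hsp with hsp1 | hsp2
            · exact pvExpand_space_not_mem t hsp1
            · exact absurd (List.eq_of_mem_replicate hsp2) (by decide)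
          have hleq : l = l.take i ++ '{' :: (t ++ '}' :: m) := by
            conv_lhs => rw [← List.take_append_drop i l, hdrop, htr.1]
            rw [hsplit]
          set l' := l.take i ++ '{' :: (X ++ '}' :: m) with hl'def
          have htki : (l.take i).length = i := by simp [List.length_take]; omega
          have hl'drop : l'.drop ((i + 1) + t.length + 1) = X.drop (t.length + 1) ++ '}' :: m := by
            rw [hl'def, show (i + 1) + t.length + 1 = (l.take i).length + (t.length + 2) by omega,
              pvDropApp, List.drop_succ_cons, List.drop_append_of_le_length (by omega)]
          have hl'take : l'.take ((i + 1) + t.length + 1) = l.take i ++ '{' :: X.take (t.length + 1) := by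
            rw [hl'def, show (i + 1) + t.length + 1 = (l.take i).length + (t.length + 2) by omega,
              pvTakeApp, List.take_succ_cons, List.take_append_of_le_length (by omega)]
          obtain ⟨pc, hpc⟩ : ∃ pc, X[t.length]? = some pc :=
            ⟨_, List.getElem?_eq_getElem (by omega)⟩
          have hprev' : l'[(i + 1) + t.length + 1 - 1]? = some pc := by
            rw [hl'def, show (i + 1) + t.length + 1 - 1 = (l.take i).length + (t.length + 1) by omega,
              List.getElem?_append_right (by omega)]
            simp only [Nat.add_sub_cancel_left, List.getElem?_cons_succ]
            rw [List.getElem?_append_left (by omega)]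
            exact hpc
          rw [ih l' ((i + 1) + t.length + 1) pc (by omega) hprev'
            (by rw [hl'drop]; exact pvGood_mid _ _ _ hgm)
            (by
              rw [hl'drop]
              have hlen' : l'.length = i + 1 + X.length + 1 + m.length := by
                simp [hl'def, htki]
                omega
              have hcnt' : (X.drop (t.length + 1) ++ '}' :: m).count ' ' = m.count ' ' := by
                rw [List.count_append, List.count_cons]
                have : (X.drop (t.length + 1)).count ' ' = 0 :=
                  List.count_eq_zero.mpr (fun hsp => hXnospace (List.mem_of_mem_drop hsp))
                simp [this]
              rw [hcnt', hlen', hXlen]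
              rw [hcountstep, htr.1, hcount2] at hf
              simp at hf
              omega)]
          rw [hl'drop, hl'take]
          rw [pvScan_inert (X.drop (t.length + 1)).length _ le_rfl _ m
            (fun hsp => hXnospace (List.mem_of_mem_drop hsp))]
          rw [hspn]
          rw [List.append_assoc, List.cons_append, ← List.append_assoc, List.take_append_drop]
      · rw [if_neg (fun hc => htr ⟨by rw [hgeti] at hc; exact Option.some.inj hc.1,
          by rw [hgetp] at hc; exact Option.some.inj hc.2⟩)]
        have hgood2 : pvGoodB l[i] (l.drop (i + 1)) = true := by
          rw [hdrop] at hgood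
          simp only [pvGoodB, Bool.and_eq_true] at hgood
          exact hgood.2
        rw [ih l (i + 1) l[i] (by omega)
          (by rw [show i + 1 - 1 = i by omega]; exact List.getElem?_eq_getElem hi)
          hgood2 (by rw [hcountstep] at hf; split_ifs at hf <;> omega)]
        conv_rhs => rw [hdrop]
        rw [show pvScan prev (l[i] :: l.drop (i + 1)) = l[i] :: pvScan l[i] (l.drop (i + 1)) from by
          rw [pvScan, if_neg (fun hc => htr ⟨hc.1, hc.2.1⟩)]]
        have htk1 : l.take (i + 1) = l.take i ++ [l[i]] := by
          rw [List.take_succ, List.getElem?_eq_getElem hi]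
          rfl
        rw [htk1, List.append_assoc]
        rfl
    · rw [if_neg hi]
      rw [List.drop_eq_nil_of_le (by omega), pvScan, List.take_of_length_le (by omega)]
      simp

-- MAIN B: the one-pass loop equals the one-pass scan
theorem pvLoopB_spec (fuel : Nat) : ∀ (l : List Char) (i : Nat) (out : List Char) (prev : Char),
    l.length - i + 1 ≤ fuel → (i = 0 → prev = '}') → (1 ≤ i → l[i-1]? = some prev) →
    pvLoopB l fuel i out = out ++ pvScan prev (l.drop i) := by
  induction fuel with
  | zero => intro l i out prev hf _ _; omega
  | succ f ih =>
    intro l i out prev hf h0 h1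
    rw [pvLoopB]
    by_cases hi : i < l.length
    · rw [if_pos hi]
      have hch : PySem.List.pyGetD l (i : Int) ' ' = l[i] := by
        rw [PySem.List.pyGetD_natCast]
        exact List.getD_eq_getElem l ' ' hi
      have hdrop : l.drop i = l[i] :: l.drop (i + 1) := List.drop_eq_getElem_cons hi
      by_cases htr : l[i] = '{' ∧ prev = '_'
      · have hipos : 1 ≤ i := by
          by_contra hz
          have : i = 0 := by omega
          rw [h0 this] at htr
          exact absurd htr.2 (by decide)
        have hprev : PySem.List.pyGetD l ((i : Int) - 1) ' ' = prev := by
          have hcast : ((i : Int) - 1) = ((i - 1 : Nat) : Int) := by omega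
          rw [hcast, PySem.List.pyGetD_natCast]
          have := h1 hipos
          rw [List.getD_eq_getElem l ' ' (by omega)]
          rw [List.getElem?_eq_getElem (by omega)] at this
          exact Option.some.inj this
        rw [if_pos ⟨by rw [hch]; exact htr.1, hipos, by rw [hprev]; exact htr.2⟩]
        by_cases hm : '}' ∈ l.drop (i + 1)
        · -- a closed block from position i
          have hffcast := PySem.Chars.findFrom_natCast l ['}'] (i + 1) (by omega)
          rw [pvFind_mem hm] at hffcast
          have hfne : ((i : Int) + 1) = (((i + 1 : Nat)) : Int) := by omega
          set t := (l.drop (i + 1)).takeWhile (· ≠ '}') with htdef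
          set L := t.length with hLdef
          have hff : PySem.Chars.findFrom l ['}'] ((i : Int) + 1) none = ((i + 1 + L : Nat) : Int) := by
            rw [hfne, hffcast, if_neg (show ¬((L : Int) = -1) by omega)]
            push_cast
            ring
          rw [hff]
          rw [if_pos (show (((i + 1 + L : Nat)) : Int) ≠ -1 by omega)]
          have hsplit := pvSplitBrace hm
          rw [← htdef] at hsplit
          have htake : PySem.List.slice l (some ((i : Int) + 1)) (some ((i + 1 + L : Nat) : Int)) = t := by
            rw [hfne, PySem.List.slice_natCast]
            have : i + 1 + L - (i + 1) = L := by omega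
            rw [this, hLdef]
            exact (List.prefix_iff_eq_take.mp (List.takeWhile_prefix _)).symm
          rw [htake, pvFoldB]
          have htoNat : (((i + 1 + L : Nat)) : Int).toNat = i + 1 + L := by omega
          rw [htoNat]
          have hdropm : l.drop (i + 1 + L + 1) = ((l.drop (i + 1)).dropWhile (· ≠ '}')).tail := by
            rw [show i + 1 + L + 1 = (i + 1) + (L + 1) by omega, ← List.drop_drop]
            conv_lhs => rw [hsplit]
            rw [hLdef]
            simp
          have hbrace : l[(i + 1 + L) - 1 + 1]? = some '}' := by
            have : (l.drop (i + 1))[L]? = some '}' := by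
              conv_lhs => rw [hsplit]
              rw [List.getElem?_append_right le_rfl]
              simp
            rw [List.getElem?_drop] at this
            rw [show (i + 1 + L) - 1 + 1 = i + 1 + L by omega]
            exact this
          rw [ih l (i + 1 + L + 1) _ '}' (by omega) (by omega) (fun _ => by
            rw [show i + 1 + L + 1 - 1 = (i + 1 + L - 1) + 1 by omega]
            exact hbrace)]
          rw [hdropm, hdrop, pvScan, if_pos ⟨htr.1, htr.2, hm⟩, htdef]
          simp
        · -- no closing brace after i: copy the character
          have hffcast := PySem.Chars.findFrom_natCast l ['}'] (i + 1) (by omega)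
          rw [pvFind_not_mem hm] at hffcast
          have hfne : ((i : Int) + 1) = (((i + 1 : Nat)) : Int) := by omega
          rw [hfne, hffcast, if_neg (by simp)]
          rw [ih l (i + 1) _ (l[i]) (by omega) (by omega) (fun _ => by
            rw [show i + 1 - 1 = i by omega]
            exact List.getElem?_eq_getElem hi)]
          rw [hdrop, pvScan, if_neg (fun hc => hm hc.2.2), hch]
          simp
      · have hBcond : ¬(PySem.List.pyGetD l (i : Int) ' ' = '{' ∧ 0 < i ∧ PySem.List.pyGetD l ((i : Int) - 1) ' ' = '_') := by
          rintro ⟨hc1, hc2, hc3⟩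
          apply htr
          refine ⟨by rw [← hch]; exact hc1, ?_⟩
          have hsome := h1 hc2
          have hcast : ((i : Int) - 1) = ((i - 1 : Nat) : Int) := by omega
          rw [hcast, PySem.List.pyGetD_natCast, List.getD_eq_getElem l ' ' (by omega)] at hc3
          rw [List.getElem?_eq_getElem (by omega)] at hsome
          rw [← Option.some.inj hsome]
          exact hc3
        rw [if_neg hBcond]
        rw [ih l (i + 1) _ (l[i]) (by omega) (by omega) (fun _ => by
          rw [show i + 1 - 1 = i by omega]
          exact List.getElem?_eq_getElem hi)]
        rw [hdrop, pvScan, if_neg (fun hc => htr ⟨hc.1, hc.2.1⟩), hch]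
        simp
    · rw [if_neg hi, List.drop_eq_nil_of_le (by omega), pvScan]
      simp

lemma pvAlt_eq (s : String) : subscript_sym_alt s = String.ofList (pvScan '}' s.toList) := by
  unfold subscript_sym_alt
  rw [pvLoopB_spec (s.toList.length + 1) s.toList 0 [] '}' (by omega) (fun _ => rfl)
    (fun h => absurd h (by omega))]
  rfl

-- A's wraparound trigger at position 0: the whole first brace group is expanded
lemma pvWrapA (rest : List Char) (hgood : pvGoodB '{' rest = true)
    (hwl : ('{' :: rest).getLast? = some '_') (hm : '}' ∈ rest) :
    pvLoopA (('{' :: rest).length + 2 * ('{' :: rest).count ' ' + 1) ('{' :: rest) 0 =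
      some ('{' :: ((pvExpand (rest.takeWhile (· ≠ '}')) ++ List.replicate ((rest.takeWhile (· ≠ '}')).count ' ') '}')
        ++ '}' :: pvScan '}' ((rest.dropWhile (· ≠ '}')).tail))) := by
  have hsplit := pvSplitBrace hm
  set t := rest.takeWhile (· ≠ '}') with htdef
  set m := (rest.dropWhile (· ≠ '}')).tail with hmdef
  have hlen2 := congrArg List.length hsplit
  rw [List.length_append, List.length_cons] at hlen2
  have hcount2 : rest.count ' ' = t.count ' ' + m.count ' ' := by
    conv_lhs => rw [hsplit]
    simp [List.count_append]
  rw [pvLoopA, if_pos (by simp), if_pos ⟨by rw [PySem.List.pyGet?_natCast]; rfl,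
    by rw [show ((0 : Nat) : Int) - 1 = -1 by norm_num, PySem.List.pyGet?_neg_one, hwl]⟩]
  have hinner : pvInnerA ('{' :: rest).length ('{' :: rest) (0 + 1) [] = some ((0 + 1) + t.length, [] ++ t) := by
    refine pvInnerA_spec t _ 1 [] ('{' :: rest) m (by simpa using hsplit) (pvTakeWhile_no_brace rest) ?_
    simp only [List.length_cons]
    omega
  rw [hinner]
  simp only [List.nil_append]
  rw [pvCount_single, pvReplace_single]
  have hsl1 : PySem.List.slice ('{' :: rest) none (some ((0 : Nat) : Int)) = [] := by
    rw [PySem.List.slice_to_natCast]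
    simp
  have hsl2 : PySem.List.slice ('{' :: rest) (some ((((0 + 1) + t.length : Nat) : Int) + 1)) none = m := by
    rw [show ((((0 + 1) + t.length : Nat) : Int) + 1) = ((t.length + 2 : Nat) : Int) by omega,
      PySem.List.slice_from_natCast]
    rw [show t.length + 2 = 1 + (t.length + 1) by omega, ← List.drop_drop, List.drop_one, List.tail_cons]
    conv_lhs => rw [hsplit]
    rw [pvDropApp t ('}' :: m) 1, List.drop_one, List.tail_cons]
  rw [hsl1, hsl2, List.nil_append]
  have hbrace2 : ('{' :: (t ++ '}' :: m))[(0 + 1) + t.length + 1 - 1]? = some '}' := by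
    rw [show (0 + 1) + t.length + 1 - 1 = t.length + 1 by omega, List.getElem?_cons_succ,
      List.getElem?_append_right le_rfl]
    simp
  have hgm : pvGoodB '}' m = true := by
    rw [hsplit] at hgood
    exact pvGood_peel t '{' m hgood
  set X := pvExpand t ++ List.replicate (t.count ' ') '}' with hXdef
  have hXlen : X.length = t.length + 2 * t.count ' ' := by
    simp [hXdef, pvExpand_length t]
    omega
  have hXnospace : ' ' ∉ X := by
    rw [hXdef]
    intro hsp
    rcases List.mem_append.mp hsp with hsp1 | hsp2
    · exact pvExpand_space_not_mem t hsp1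
    · exact absurd (List.eq_of_mem_replicate hsp2) (by decide)
  have hdropi : ('{' :: (t ++ '}' :: m)).drop ((0 + 1) + t.length + 1) = m := by
    rw [show (0 + 1) + t.length + 1 = (t.length + 1) + 1 by omega, List.drop_succ_cons,
      show t.length + 1 = t.length + 1 from rfl, pvDropApp t ('}' :: m) 1, List.drop_one, List.tail_cons]
  by_cases hcnt : t.count ' ' = 0
  · have hXt : X = t := by
      rw [hXdef, hcnt, pvExpand_no_space (List.count_eq_zero.mp hcnt)]
      simp
    rw [hXt]
    rw [pvLoopA_spec _ ('{' :: (t ++ '}' :: m)) ((0 + 1) + t.length + 1) '}' (by omega) hbrace2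
      (by rw [hdropi]; exact hgm)
      (by
        rw [hdropi]
        simp only [List.length_cons, List.count_cons, List.length_append]
        simp
        omega)]
    rw [hdropi]
    rw [show (0 + 1) + t.length + 1 = (t.length + 1) + 1 by omega, List.take_succ_cons,
      show t.length + 1 = t.length + 1 from rfl, pvTakeApp t ('}' :: m) 1]
    simp
  · have hX1 : t.length + 1 ≤ X.length := by omega
    have hl'drop : ('{' :: (X ++ '}' :: m)).drop ((0 + 1) + t.length + 1) = X.drop (t.length + 1) ++ '}' :: m := by
      rw [show (0 + 1) + t.length + 1 = (t.length + 1) + 1 by omega, List.drop_succ_cons,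
        List.drop_append_of_le_length hX1]
    have hl'take : ('{' :: (X ++ '}' :: m)).take ((0 + 1) + t.length + 1) = '{' :: X.take (t.length + 1) := by
      rw [show (0 + 1) + t.length + 1 = (t.length + 1) + 1 by omega, List.take_succ_cons,
        List.take_append_of_le_length hX1]
    obtain ⟨pc, hpc⟩ : ∃ pc, X[t.length]? = some pc :=
      ⟨_, List.getElem?_eq_getElem (by omega)⟩
    have hprev' : ('{' :: (X ++ '}' :: m))[(0 + 1) + t.length + 1 - 1]? = some pc := by
      rw [show (0 + 1) + t.length + 1 - 1 = t.length + 1 by omega, List.getElem?_cons_succ,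
        List.getElem?_append_left (by omega)]
      exact hpc
    rw [pvLoopA_spec _ ('{' :: (X ++ '}' :: m)) ((0 + 1) + t.length + 1) pc (by omega) hprev'
      (by rw [hl'drop]; exact pvGood_mid _ _ _ hgm)
      (by
        rw [hl'drop]
        have hcnt' : (X.drop (t.length + 1) ++ '}' :: m).count ' ' = m.count ' ' := by
          rw [List.count_append, List.count_cons]
          have : (X.drop (t.length + 1)).count ' ' = 0 :=
            List.count_eq_zero.mpr (fun hsp => hXnospace (List.mem_of_mem_drop hsp))
          simp [this]
        rw [hcnt']
        simp only [List.length_cons, List.count_cons, List.length_append]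
        simp
        omega)]
    rw [hl'drop, hl'take]
    rw [pvScan_inert (X.drop (t.length + 1)).length _ le_rfl _ m
      (fun hsp => hXnospace (List.mem_of_mem_drop hsp))]
    rw [List.cons_append, ← List.append_assoc, List.take_append_drop]

-- pvBeforePat through pvPatSplit
lemma pvBeforePat_some {t u v : List Char} (h : pvPatSplit t = some (u, v)) : pvBeforePat t = u := by
  simp [pvBeforePat, h]
lemma pvBeforePat_none {t : List Char} (h : pvPatSplit t = none) : pvBeforePat t = t := by
  simp [pvBeforePat, h]

lemma pvExpand_pat (u v : List Char) :
    pvExpand (u ++ '_' :: '{' :: v) = pvExpand u ++ '_' :: '{' :: pvExpand v := by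
  rw [pvExpand_append]
  simp [pvExpand, List.flatMap_cons]

lemma pvCount_pat (u v : List Char) :
    (u ++ '_' :: '{' :: v).count ' ' = u.count ' ' + v.count ' ' := by
  simp [List.count_append]

-- the value of B on a wraparound block (what pvScan makes of '{' :: rest)
lemma pvScanWrap (rest : List Char) (hm : '}' ∈ rest) :
    pvScan '}' ('{' :: rest) = '{' :: pvScan '{' (rest.takeWhile (· ≠ '}') ++ '}' :: (rest.dropWhile (· ≠ '}')).tail) := by
  rw [pvScan, if_neg (by rintro ⟨-, h, -⟩; exact absurd h (by decide))]
  rw [← pvSplitBrace hm]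

-- A agrees with the one-pass scan on every Pre_ input outside D_
lemma pvTopEq (l : List Char) (hpre : pvPreB l = true)
    (hnd : ¬(l.head? = some '{' ∧ l.getLast? = some '_' ∧ '}' ∈ l.tail ∧
      ' ' ∈ pvBeforePat (l.tail.takeWhile (· ≠ '}')))) :
    (pvLoopA (l.length + 2 * l.count ' ' + 1) l 0).getD l = pvScan '}' l := by
  cases l with
  | nil => rw [pvScan]; rfl
  | cons c rest =>
    simp only [pvPreB, Bool.and_eq_true] at hpre
    obtain ⟨hgood, hclause⟩ := hpre
    by_cases hwrap : c = '{' ∧ (c :: rest).getLast? = some '_'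
    · obtain ⟨rfl, hwl⟩ := hwrap
      have hm : '}' ∈ rest := by
        rw [Bool.or_eq_true] at hclause
        rcases hclause with hcl | hcl
        · rw [hwl] at hcl
          simp at hcl
        · simpa using hcl
      rw [pvWrapA rest hgood hwl hm, Option.getD_some, pvScanWrap rest hm]
      set t := rest.takeWhile (· ≠ '}') with htdef
      set m := (rest.dropWhile (· ≠ '}')).tail with hmdef
      have hnb : '}' ∉ t := pvTakeWhile_no_brace rest
      rcases hps : pvPatSplit t with _ | ⟨u, v⟩
      · -- no '_{' inside the block: the block must be space-free (else D_)
        have hsp : ' ' ∉ t := by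
          intro hsp
          exact hnd ⟨rfl, hwl, by simpa using hm, by rwa [List.tail_cons, ← htdef, pvBeforePat_none hps]⟩
        rw [pvScan_nopat t '{' m hps hnb (fun h => absurd h (by decide))]
        rw [pvExpand_no_space hsp, List.count_eq_zero.mpr hsp]
        simp
      · -- block with an inner '_{': everything before it is space-free (else D_)
        have hsp : ' ' ∉ u := by
          intro hsp
          exact hnd ⟨rfl, hwl, by simpa using hm, by rwa [List.tail_cons, ← htdef, pvBeforePat_some hps]⟩
        rw [pvScan_pat t '{' m hps hnb (fun h => absurd h (by decide))]
        rw [pvPatSplit_eq t hps, pvExpand_pat, pvCount_pat, pvExpand_no_space hsp,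
          List.count_eq_zero.mpr hsp]
        simp
    · rw [pvLoopA, if_pos (by simp),
        if_neg (by
          rintro ⟨h1, h2⟩
          rw [PySem.List.pyGet?_natCast] at h1
          rw [show ((0 : Nat) : Int) - 1 = -1 by norm_num, PySem.List.pyGet?_neg_one] at h2
          exact hwrap ⟨by simpa using h1, h2⟩)]
      rw [pvLoopA_spec _ (c :: rest) 1 c le_rfl (by simp)
        (by simpa using hgood)
        (by
          simp only [List.length_cons, List.count_cons, List.drop_succ_cons, List.drop_zero]
          split <;> omega)]
      rw [Option.getD_some, pvScan, if_neg (by rintro ⟨-, h, -⟩; exact absurd h (by decide))]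
      simp

-- ===== VERDICT =====
theorem subscript_sym_spec : Claim_unchanged_subscript_sym := by
  intro s _ hpre
  unfold Spec_subscript_sym
  intro hnd
  unfold D_subscript_sym at hnd
  unfold Pre_subscript_sym at hpre
  unfold subscript_sym
  rw [pvTopEq s.toList hpre hnd, pvAlt_eq]
theorem subscript_sym_changed : Claim_changed_subscript_sym := by
  unfold Claim_changed_subscript_sym; decide
theorem subscript_sym_tight : Claim_exact_subscript_sym := by
  unfold Claim_exact_subscript_sym
  intro s _ hpre hd
  unfold Pre_subscript_sym at hpre
  unfold D_subscript_sym at hd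
  obtain ⟨hh, hwl, hm, hsp⟩ := hd
  rcases hl : s.toList with _ | ⟨c, rest⟩
  · rw [hl] at hh
    simp at hh
  · rw [hl] at hh hwl hm hsp hpre
    simp only [List.head?_cons, Option.some.injEq] at hh
    subst hh
    simp only [List.tail_cons] at hm hsp
    simp only [pvPreB, Bool.and_eq_true] at hpre
    obtain ⟨hgood, -⟩ := hpre
    intro heq
    unfold subscript_sym at heq
    rw [hl, pvWrapA rest hgood hwl hm, Option.getD_some, pvAlt_eq, hl, pvScanWrap rest hm] at heq
    have heql := congrArg String.toList heq
    rw [String.toList_ofList, String.toList_ofList] at heql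
    have hlen := congrArg List.length heql
    set t := rest.takeWhile (· ≠ '}') with htdef
    set m := (rest.dropWhile (· ≠ '}')).tail with hmdef
    rcases hps : pvPatSplit t with _ | ⟨u, v⟩
    · rw [pvScan_nopat t '{' m hps (pvTakeWhile_no_brace rest) (fun h => absurd h (by decide))] at hlen
      rw [pvBeforePat_none hps] at hsp
      have hc : 0 < t.count ' ' := List.count_pos_iff.mpr hsp
      simp only [List.length_cons, List.length_append, pvExpand_length, List.length_replicate] at hlen
      omega
    · rw [pvScan_pat t '{' m hps (pvTakeWhile_no_brace rest) (fun h => absurd h (by decide))] at hlen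
      rw [pvBeforePat_some hps] at hsp
      have hc : 0 < u.count ' ' := List.count_pos_iff.mpr hsp
      have ht := pvPatSplit_eq t hps
      have htl := congrArg List.length ht
      have htc := congrArg (List.count ' ') ht
      rw [pvCount_pat] at htc
      simp only [List.length_append, List.length_cons] at htl
      simp only [List.length_cons, List.length_append, pvExpand_length, List.length_replicate] at hlen
      omega
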